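-- pv_equiv track=rewrite | github.com/YAPP-18th/Study_Algorithm_Team_3 | Sort/KthNumber/jaeeun.py | solution
-- ===== SOURCE A (Python) =====
-- def solution(array, commands):
--     answer = []
--     array_data =[]
--     for i in (commands):
--         array_data = array[i[0]-1:i[1]]
--         array_data.sort()
--         answer.append(array_data[i[2]-1])
--     return answer
-- ===== SOURCE B (Python) =====
-- def _insert_sorted(best, x):
--     # insert x into the sorted list best (after any equal elements), returning a new list
--     out = []
--     j = 0
--     while j < len(best) and best[j] <= x:
--         out.append(best[j])
--         j += 1
--     out.append(x)
--     out.extend(best[j:])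
--     return out
--
--
-- def _kth_smallest(sub, k):
--     # keep only the k smallest elements seen so far, sorted; O(len(sub)*k)
--     best = []
--     for x in sub:
--         if len(best) < k or x < best[-1]:
--             best = _insert_sorted(best, x)
--             if len(best) > k:
--                 best.pop()
--     return best[k - 1]
--
--
-- def solution(array, commands):
--     return [_kth_smallest(array[c[0] - 1:c[1]], c[2]) for c in commands]
-- ===== Notes on version B (the rewrite author's own statement) =====
-- stated objective: alternative
-- what changed: Instead of fully sorting each queried slice and indexing into it, B makes one pass over the slice maintaining a sorted list of only the k smallest elements seen so far (bounded insertion selection) and returns its last element.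
-- outside the precondition, e.g. on solution([1, 2, 3], [[1, 3, 0]]): A returns [3], B raises IndexError; on solution([1, 2, 3], [[1, 3, -1]]): A returns [2], B raises IndexError; on solution([1, 2, 3], [[1, 3, 4]]): A raises IndexError, B raises IndexError
import Mathlib
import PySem

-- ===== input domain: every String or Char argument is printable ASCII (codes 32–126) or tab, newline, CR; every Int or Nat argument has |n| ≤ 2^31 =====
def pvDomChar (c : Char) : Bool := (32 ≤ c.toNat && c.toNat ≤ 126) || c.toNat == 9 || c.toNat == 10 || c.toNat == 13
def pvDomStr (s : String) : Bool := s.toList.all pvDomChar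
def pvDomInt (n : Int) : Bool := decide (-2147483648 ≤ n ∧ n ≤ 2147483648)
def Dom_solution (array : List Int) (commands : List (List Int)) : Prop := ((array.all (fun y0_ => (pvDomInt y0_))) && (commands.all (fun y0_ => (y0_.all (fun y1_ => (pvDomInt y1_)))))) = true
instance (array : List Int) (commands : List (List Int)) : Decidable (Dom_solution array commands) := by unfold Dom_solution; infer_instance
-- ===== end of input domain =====

-- B replaces A's full sort of each queried slice by a bounded insertion selection that keeps
-- only the k smallest elements seen so far (a different algorithm); return values agree on Pre_.

-- ===== PORT A =====
-- for i in commands: array_data = array[i[0]-1:i[1]]; array_data.sort(); answer.append(array_data[i[2]-1])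
def solution (array : List Int) (commands : List (List Int)) : List Int :=
  commands.foldl (fun answer i =>
    let array_data := PySem.List.slice array (some (i.getD 0 0 - 1)) (some (i.getD 1 0))
    let array_data := PySem.List.sorted array_data (fun y => y) false
    answer ++ [PySem.List.pyGetD array_data (i.getD 2 0 - 1) 0]) []

-- ===== PORT B =====
-- _insert_sorted: the left scan 'while j < len(best) and best[j] <= x' copies exactly the
-- longest prefix of elements ≤ x (takeWhile), then x, then the rest (dropWhile) — exact.
def insertSorted (best : List Int) (x : Int) : List Int :=
  best.takeWhile (fun y => decide (y ≤ x)) ++ x :: best.dropWhile (fun y => decide (y ≤ x))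

-- _kth_smallest: fold keeping 'best' = the (at most) k smallest seen, sorted; best[-1] is
-- getLast? (Python would raise on empty best, reachable only outside Pre_).
def selStep (k : Int) (best : List Int) (x : Int) : List Int :=
  if decide ((best.length : Int) < k) ||
     (match best.getLast? with | some m => decide (x < m) | none => false) then
    let b2 := insertSorted best x
    if decide (k < (b2.length : Int)) then b2.dropLast else b2
  else best

def kthSmallest (sub : List Int) (k : Int) : Int :=
  PySem.List.pyGetD (sub.foldl (selStep k) []) (k - 1) 0

def solution_alt (array : List Int) (commands : List (List Int)) : List Int :=
  commands.map (fun c =>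
    kthSmallest (PySem.List.slice array (some (c.getD 0 0 - 1)) (some (c.getD 1 0))) (c.getD 2 0))

-- ===== PRECONDITION & SPEC =====
-- Pre_ excludes commands shorter than 3 (A raises IndexError) and commands whose k = c[2] is not
-- between 1 and the slice length: there A either raises IndexError (k > len or k < 1-len) or,
-- for k ≤ 0 within negative-wraparound range, returns a value by Python's negative indexing
-- (an artefact a selection of the 'k-th smallest' cannot reproduce); B raises IndexError on all
-- of these, so they lie outside Pre_.
def Pre_solution (array : List Int) (commands : List (List Int)) : Prop :=
  ∀ c ∈ commands, 3 ≤ c.length ∧ 1 ≤ c.getD 2 0 ∧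
    c.getD 2 0 ≤ ((PySem.List.slice array (some (c.getD 0 0 - 1)) (some (c.getD 1 0))).length : Int)
instance (array : List Int) (commands : List (List Int)) : Decidable (Pre_solution array commands) := by
  unfold Pre_solution; infer_instance

def pvWitness_solution : List Int × List (List Int) := ([3, 1, 2, 5, 4], [[1, 5, 3], [2, 4, 1]])

def Spec_solution (array : List Int) (commands : List (List Int)) (out : List Int) : Prop := out = solution_alt array commands
instance (array : List Int) (commands : List (List Int)) (out : List Int) : Decidable (Spec_solution array commands out) := by unfold Spec_solution; infer_instance

-- ===== CLAIM (what is proved, stated in full; the proofs are below) =====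
def Claim_equal_solution : Prop := ∀ (array : List Int) (commands : List (List Int)), Dom_solution array commands → Pre_solution array commands → Spec_solution array commands (solution array commands)

-- ===== LEMMAS AND PROOFS =====

-- takeWhile/dropWhile are the take/drop at the split point
theorem pvTakeWhile_eq_take (p : Int → Bool) (l : List Int) :
    l.takeWhile p = l.take (l.takeWhile p).length :=
  List.prefix_iff_eq_take.mp (List.takeWhile_prefix p)

theorem pvDropWhile_eq_drop (p : Int → Bool) (l : List Int) :
    l.dropWhile p = l.drop (l.takeWhile p).length := by
  calc l.dropWhile p
      = List.drop (l.takeWhile p).length (l.takeWhile p ++ l.dropWhile p) := List.drop_left.symm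
    _ = l.drop (l.takeWhile p).length := by rw [List.takeWhile_append_dropWhile]

theorem insertSorted_perm (s : List Int) (x : Int) : (insertSorted s x).Perm (x :: s) := by
  unfold insertSorted
  have h := List.perm_middle (a := x) (l₁ := s.takeWhile (fun y => decide (y ≤ x)))
    (l₂ := s.dropWhile (fun y => decide (y ≤ x)))
  rwa [List.takeWhile_append_dropWhile] at h

theorem mem_insertSorted {s : List Int} {x b : Int} (h : b ∈ insertSorted s x) :
    b = x ∨ b ∈ s := by
  have := (insertSorted_perm s x).mem_iff.mp h
  simpa using this

theorem insertSorted_length (s : List Int) (x : Int) :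
    (insertSorted s x).length = s.length + 1 := by
  have := (insertSorted_perm s x).length_eq
  simpa using this

theorem insertSorted_pairwise (x : Int) (s : List Int) (hs : s.Pairwise (· ≤ ·)) :
    (insertSorted s x).Pairwise (· ≤ ·) := by
  induction s with
  | nil => simp [insertSorted]
  | cons a s ih =>
    rcases List.pairwise_cons.mp hs with ⟨ha, hs'⟩
    by_cases h : a ≤ x
    · have : insertSorted (a :: s) x = a :: insertSorted s x := by
        simp [insertSorted, h]
      rw [this, List.pairwise_cons]
      refine ⟨?_, ih hs'⟩
      intro b hb
      rcases mem_insertSorted hb with rfl | hb'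
      · exact h
      · exact ha b hb'
    · have hxa : x ≤ a := le_of_not_ge h
      have : insertSorted (a :: s) x = x :: a :: s := by
        simp [insertSorted, h]
      rw [this, List.pairwise_cons]
      refine ⟨?_, hs⟩
      intro b hb
      rcases List.mem_cons.mp hb with rfl | hb'
      · exact hxa
      · exact le_trans hxa (ha b hb')

theorem pvSorted_nil : PySem.List.sorted ([] : List Int) (fun y => y) false = [] :=
  PySem.List.sorted_id_eq_of_perm_of_pairwise _ _ (List.Perm.refl _) (by simp)

theorem pvSorted_snoc (p : List Int) (x : Int) :
    PySem.List.sorted (p ++ [x]) (fun y => y) false =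
      insertSorted (PySem.List.sorted p (fun y => y) false) x := by
  apply PySem.List.sorted_id_eq_of_perm_of_pairwise
  · exact ((insertSorted_perm _ _).trans
      (List.Perm.cons x (PySem.List.sorted_perm p _ _))).trans
      (List.perm_append_singleton x p).symm
  · exact insertSorted_pairwise x _ (PySem.List.sorted_pairwise p _)

theorem pvPairwise_getElem_le {s : List Int} (hs : s.Pairwise (· ≤ ·)) {i j : Nat}
    (hij : i ≤ j) (hj : j < s.length) : s[i]'(by omega) ≤ s[j] := by
  rcases Nat.lt_or_ge i j with h | h
  · exact List.pairwise_iff_getElem.mp hs i j (by omega) hj h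
  · have : i = j := by omega
    subst this; rfl

-- the loop body of B keeps 'take k of the sorted prefix' invariant
theorem selStep_take (k : Int) (hk : 1 ≤ k) (s : List Int) (hs : s.Pairwise (· ≤ ·)) (x : Int) :
    selStep k (s.take k.toNat) x = (insertSorted s x).take k.toNat := by
  have hkpos : 1 ≤ k.toNat := by omega
  have hcast : (k.toNat : Int) = k := by omega
  rcases Nat.lt_or_ge s.length k.toNat with hlen | hlen
  · -- fewer than k elements so far: always insert, never trim
    have hts : s.take k.toNat = s := List.take_of_length_le (by omega)
    rw [hts]
    unfold selStep
    have hc1 : decide ((s.length : Int) < k) = true := by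
      simp only [decide_eq_true_eq]; omega
    rw [hc1, Bool.true_or, if_pos rfl]
    have hl2 := insertSorted_length s x
    have hc2 : decide (k < ((insertSorted s x).length : Int)) = false := by
      simp only [decide_eq_false_iff_not, not_lt, hl2]; push_cast; omega
    simp only [hc2, Bool.false_eq_true, if_false]
    exact (List.take_of_length_le (by omega)).symm
  · -- already k elements: compare with the current k-th smallest
    have hbl : (s.take k.toNat).length = k.toNat := by
      simp [List.length_take]; omega
    have hm : k.toNat - 1 < s.length := by omega
    have hlast : (s.take k.toNat).getLast? = some (s[k.toNat - 1]) := by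
      rw [List.getLast?_eq_getElem?, hbl, List.getElem?_take]
      rw [if_pos (by omega), List.getElem?_eq_getElem hm]
    unfold selStep
    have hc1 : decide (((s.take k.toNat).length : Int) < k) = false := by
      simp only [decide_eq_false_iff_not, not_lt, hbl, hcast]
      exact le_rfl
    rw [hc1, Bool.false_or, hlast]
    by_cases hxm : x < s[k.toNat - 1]
    · -- new element beats the current k-th smallest: insert, drop the last
      rw [if_pos (by simp [hxm])]
      have hl2 : (insertSorted (s.take k.toNat) x).length = k.toNat + 1 := by
        rw [insertSorted_length, hbl]
      simp only [hl2]
      rw [if_pos (by simp only [decide_eq_true_eq]; push_cast; omega)]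
      -- split point of the insertion into s lies strictly below k
      have ht : (s.takeWhile (fun y => decide (y ≤ x))).length < k.toNat := by
        by_contra hge
        rw [not_lt] at hge
        have hmem : s[k.toNat - 1] ∈ s.takeWhile (fun y => decide (y ≤ x)) := by
          rw [pvTakeWhile_eq_take]
          have h1 : k.toNat - 1 <
              (s.take (s.takeWhile (fun y => decide (y ≤ x))).length).length := by
            simp [List.length_take]
            constructor <;> omega
          have h2 : (s.take (s.takeWhile (fun y => decide (y ≤ x))).length)[k.toNat - 1]'h1
              = s[k.toNat - 1] := List.getElem_take
          rw [← h2]; exact List.getElem_mem h1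
        have := List.mem_takeWhile_imp hmem
        simp only [decide_eq_true_eq] at this
        omega
      -- takeWhile/dropWhile of the k-prefix in terms of those of s
      have htw : (s.take k.toNat).takeWhile (fun y => decide (y ≤ x))
          = s.takeWhile (fun y => decide (y ≤ x)) := by
        rw [← List.take_takeWhile]
        exact List.take_of_length_le (le_of_lt ht)
      have hdw : (s.take k.toNat).dropWhile (fun y => decide (y ≤ x))
          = (s.drop (s.takeWhile (fun y => decide (y ≤ x))).length).take
              (k.toNat - (s.takeWhile (fun y => decide (y ≤ x))).length) := by
        rw [pvDropWhile_eq_drop, htw, List.drop_take]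
      have hBlen : ((s.drop (s.takeWhile (fun y => decide (y ≤ x))).length).take
            (k.toNat - (s.takeWhile (fun y => decide (y ≤ x))).length)).length
          = k.toNat - (s.takeWhile (fun y => decide (y ≤ x))).length := by
        simp [List.length_take]
        omega
      have hBne : (s.drop (s.takeWhile (fun y => decide (y ≤ x))).length).take
            (k.toNat - (s.takeWhile (fun y => decide (y ≤ x))).length) ≠ [] := by
        intro h; rw [h] at hBlen; simp at hBlen; omega
      rw [show insertSorted (s.take k.toNat) x
            = s.takeWhile (fun y => decide (y ≤ x)) ++ x ::
              (s.drop (s.takeWhile (fun y => decide (y ≤ x))).length).take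
                (k.toNat - (s.takeWhile (fun y => decide (y ≤ x))).length) by
        rw [insertSorted, htw, hdw]]
      rw [List.dropLast_append_of_ne_nil (by simp), List.dropLast_cons_of_ne_nil hBne]
      rw [show insertSorted s x = s.takeWhile (fun y => decide (y ≤ x)) ++ x ::
            s.drop (s.takeWhile (fun y => decide (y ≤ x))).length by
        rw [insertSorted, pvDropWhile_eq_drop]]
      rw [List.take_append, List.take_of_length_le (le_of_lt ht)]
      rw [show k.toNat - (s.takeWhile (fun y => decide (y ≤ x))).length
            = (k.toNat - (s.takeWhile (fun y => decide (y ≤ x))).length - 1) + 1 from by omega]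
      rw [List.take_succ_cons]
      congr 1
      congr 1
      rw [List.dropLast_eq_take]
      simp only [List.length_take, List.length_drop, List.take_take]
      congr 1
      omega
    · -- current k-th smallest stays: the prefix is unchanged
      rw [if_neg (by simp [hxm])]
      have hmx : s[k.toNat - 1] ≤ x := le_of_not_gt hxm
      -- every element of the k-prefix is ≤ x, so insertion lands at position ≥ k
      have hall : ∀ a ∈ s.take k.toNat, decide (a ≤ x) = true := by
        intro a ha
        rw [List.mem_take_iff_getElem] at ha
        obtain ⟨i, hi, he⟩ := ha
        simp only [decide_eq_true_eq]
        have h1 : i < s.length := by omega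
        have h2 : i ≤ k.toNat - 1 := by omega
        have hle := pvPairwise_getElem_le hs h2 hm
        rw [← he]
        exact le_trans hle hmx
      have htw2 : (s.take k.toNat).takeWhile (fun y => decide (y ≤ x)) = s.take k.toNat :=
        List.takeWhile_eq_self_iff.mpr hall
      have ht2 : k.toNat ≤ (s.takeWhile (fun y => decide (y ≤ x))).length := by
        have h := congrArg List.length ((List.take_takeWhile (i := k.toNat)
          (l := s) (p := fun y => decide (y ≤ x))).trans htw2)
        simp only [List.length_take] at h
        omega
      rw [insertSorted, List.take_append]
      rw [show k.toNat - (s.takeWhile (fun y => decide (y ≤ x))).length = 0 from by omega]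
      rw [List.take_zero, List.append_nil]
      rw [pvTakeWhile_eq_take, List.take_take]
      congr 1
      omega

theorem pvFold_sel (k : Int) (hk : 1 ≤ k) (p : List Int) :
    p.foldl (selStep k) [] = (PySem.List.sorted p (fun y => y) false).take k.toNat := by
  induction p using List.reverseRecOn with
  | nil => simp [pvSorted_nil]
  | append_singleton p x ih =>
    rw [List.foldl_append, List.foldl_cons, List.foldl_nil, ih, pvSorted_snoc]
    exact selStep_take k hk _ (PySem.List.sorted_pairwise p _) x

theorem pvKth_eq (sub : List Int) (k : Int) (h1 : 1 ≤ k) (h2 : k ≤ (sub.length : Int)) :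
    kthSmallest sub k
      = PySem.List.pyGetD (PySem.List.sorted sub (fun y => y) false) (k - 1) 0 := by
  unfold kthSmallest
  rw [pvFold_sel k h1]
  have hlen : (PySem.List.sorted sub (fun y => y) false).length = sub.length :=
    PySem.List.length_sorted sub _ _
  have hkn : k.toNat ≤ sub.length := by omega
  have htl : ((PySem.List.sorted sub (fun y => y) false).take k.toNat).length = k.toNat := by
    simp [List.length_take, hlen]; omega
  rw [PySem.List.pyGetD_eq_getElem _ _ (by omega) (by rw [htl]; omega)]
  rw [PySem.List.pyGetD_eq_getElem _ _ (by omega) (by rw [hlen]; omega)]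
  exact List.getElem_take

-- ===== VERDICT (by name: the statement is the Claim_ definition above) =====
theorem solution_spec : Claim_equal_solution := by
  intro array commands _ hpre
  unfold Spec_solution solution solution_alt
  have hA : List.foldl (fun (answer : List Int) (i : List Int) =>
        let array_data := PySem.List.slice array (some (i.getD 0 0 - 1)) (some (i.getD 1 0))
        let array_data := PySem.List.sorted array_data (fun y => y) false
        answer ++ [PySem.List.pyGetD array_data (i.getD 2 0 - 1) 0]) [] commands
      = [] ++ commands.map (fun i => PySem.List.pyGetD
          (PySem.List.sorted (PySem.List.slice array (some (i.getD 0 0 - 1)) (some (i.getD 1 0)))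
            (fun y => y) false) (i.getD 2 0 - 1) 0) :=
    PySem.List.foldl_append_singleton_eq_map _ commands []
  rw [hA, List.nil_append]
  apply List.map_congr_left
  intro c hc
  obtain ⟨-, hk1, hk2⟩ := hpre c hc
  exact (pvKth_eq _ _ hk1 hk2).symm
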